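-- pv_equiv track=rewrite | github.com/whisperengine-ai/whisperengine-v2 | src/intelligence/simplified_emotion_manager.py | _emotions_compatible
-- ===== SOURCE A (Python) =====
-- def _emotions_compatible(emotion1: str, emotion2: str) -> bool:
--     """Check if two emotions are compatible/related."""
--     compatible_groups = [
--         {"joy", "contentment", "engagement", "awe"},
--         {"frustration", "concern", "confusion"},
--         {"surprise", "awe", "contemplation"},
--         {"neutral", "contemplation"}
--     ]
--
--     for group in compatible_groups:
--         if emotion1 in group and emotion2 in group:
--             return True
--     return False
-- ===== SOURCE B (Python) =====
-- def _emotions_compatible(emotion1: str, emotion2: str) -> bool: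
--     """Check if two emotions are compatible/related, via an inverted index."""
--     compatible_groups = [
--         {"joy", "contentment", "engagement", "awe"},
--         {"frustration", "concern", "confusion"},
--         {"surprise", "awe", "contemplation"},
--         {"neutral", "contemplation"}
--     ]
--     index = {}
--     for i, group in enumerate(compatible_groups):
--         for emotion in group:
--             index.setdefault(emotion, set()).add(i)
--     return bool(index.get(emotion1, set()) & index.get(emotion2, set()))
-- ===== Notes on version B (the rewrite author's own statement) =====
-- stated objective: idiomatic
-- what changed: Replaces the per-group scan testing both emotions' membership with an inverted index mapping each emotion to the set of group ids containing it, answering by set intersection (awe/contemplation correctly map to two ids).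
import Mathlib
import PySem

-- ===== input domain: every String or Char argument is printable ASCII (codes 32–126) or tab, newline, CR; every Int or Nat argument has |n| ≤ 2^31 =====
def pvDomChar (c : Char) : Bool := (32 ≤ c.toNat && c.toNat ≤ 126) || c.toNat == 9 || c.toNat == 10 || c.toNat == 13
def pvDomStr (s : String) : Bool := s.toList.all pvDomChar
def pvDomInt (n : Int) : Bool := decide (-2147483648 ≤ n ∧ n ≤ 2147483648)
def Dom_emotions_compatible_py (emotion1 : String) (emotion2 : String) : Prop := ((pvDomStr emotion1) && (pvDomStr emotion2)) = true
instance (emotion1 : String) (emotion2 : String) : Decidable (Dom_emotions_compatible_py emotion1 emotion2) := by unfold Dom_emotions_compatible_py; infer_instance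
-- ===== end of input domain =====

-- B replaces A's scan over the four groups (membership of both emotions per group) by an
-- inverted index emotion → set of group ids built once, answering by set intersection (idiomatic; same cost on this constant-size data).

-- ===== PORT A =====
def emotions_compatible_py (emotion1 : String) (emotion2 : String) : Bool :=
  let compatible_groups : List (PySem.Set String) :=
    [PySem.Set.ofList ["joy", "contentment", "engagement", "awe"],
     PySem.Set.ofList ["frustration", "concern", "confusion"],
     PySem.Set.ofList ["surprise", "awe", "contemplation"],
     PySem.Set.ofList ["neutral", "contemplation"]]
  go compatible_groups
where
  -- the 'for group in compatible_groups: if … return True' loop, with its early return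
  go : List (PySem.Set String) → Bool
  | [] => false
  | group :: rest =>
    if PySem.Set.contains group emotion1 && PySem.Set.contains group emotion2 then true
    else go rest

-- ===== PORT B =====
def emotions_compatible_py_alt (emotion1 : String) (emotion2 : String) : Bool :=
  let compatible_groups : List (PySem.Set String) :=
    [PySem.Set.ofList ["joy", "contentment", "engagement", "awe"],
     PySem.Set.ofList ["frustration", "concern", "confusion"],
     PySem.Set.ofList ["surprise", "awe", "contemplation"],
     PySem.Set.ofList ["neutral", "contemplation"]]
  -- 'for i, group in enumerate(…): for emotion in group: index.setdefault(emotion, set()).add(i)'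
  -- (setdefault(k, set()).add(i) = d[k] = d.get(k, set()) ∪ {i} in place = Dict.modify)
  let index : PySem.Dict String (PySem.Set Int) :=
    (PySem.List.enumerate compatible_groups).foldl
      (fun d ig => ig.2.foldl (fun d e => d.modify e PySem.Set.empty (fun s => PySem.Set.add s ig.1)) d)
      PySem.Dict.empty
  -- 'bool(index.get(emotion1, set()) & index.get(emotion2, set()))'
  !(PySem.Set.inter (index.getD emotion1 PySem.Set.empty) (index.getD emotion2 PySem.Set.empty)).isEmpty

-- ===== PRECONDITION & SPEC =====
def Spec_emotions_compatible_py (emotion1 : String) (emotion2 : String) (out : Bool) : Prop := out = emotions_compatible_py_alt emotion1 emotion2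
instance (emotion1 : String) (emotion2 : String) (out : Bool) : Decidable (Spec_emotions_compatible_py emotion1 emotion2 out) := by unfold Spec_emotions_compatible_py; infer_instance

-- ===== CLAIM (what is proved, stated in full; the proofs are below) =====
def Claim_equal_emotions_compatible_py : Prop := ∀ (emotion1 : String) (emotion2 : String), Dom_emotions_compatible_py emotion1 emotion2 → Spec_emotions_compatible_py emotion1 emotion2 (emotions_compatible_py emotion1 emotion2)

-- ===== LEMMAS AND PROOFS =====

-- the inverted index B builds, written out as the literal dict it evaluates to
def litIndex : PySem.Dict String (PySem.Set Int) :=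
  { items := [("joy", [0]), ("contentment", [0]), ("engagement", [0]), ("awe", [0, 2]),
              ("frustration", [1]), ("concern", [1]), ("confusion", [1]),
              ("surprise", [2]), ("contemplation", [2, 3]), ("neutral", [3])] }

theorem alt_eq (e1 e2 : String) : emotions_compatible_py_alt e1 e2 =
    !(PySem.Set.inter (litIndex.getD e1 PySem.Set.empty) (litIndex.getD e2 PySem.Set.empty)).isEmpty := rfl

-- ===== VERDICT (by name: the statement is the Claim_ definition above) =====
theorem emotions_compatible_py_spec : Claim_equal_emotions_compatible_py := by
  intro e1 e2 _
  unfold Spec_emotions_compatible_py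
  by_cases g0 : e1 = "joy"
  · subst g0
    by_cases k0 : e2 = "joy"
    · subst k0; decide
    by_cases k1 : e2 = "contentment"
    · subst k1; decide
    by_cases k2 : e2 = "engagement"
    · subst k2; decide
    by_cases k3 : e2 = "awe"
    · subst k3; decide
    by_cases k4 : e2 = "frustration"
    · subst k4; decide
    by_cases k5 : e2 = "concern"
    · subst k5; decide
    by_cases k6 : e2 = "confusion"
    · subst k6; decide
    by_cases k7 : e2 = "surprise"
    · subst k7; decide
    by_cases k8 : e2 = "contemplation"
    · subst k8; decide
    by_cases k9 : e2 = "neutral"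
    · subst k9; decide
    simp [emotions_compatible_py, emotions_compatible_py.go, alt_eq, litIndex,
      PySem.Dict.getD, PySem.Dict.get?, PySem.Set.contains, PySem.Set.ofList, PySem.Set.add,
      PySem.Set.inter, PySem.Set.empty,
      k0, k1, k2, k3, k4, k5, k6, k7, k8, k9, Ne.symm k0, Ne.symm k1, Ne.symm k2, Ne.symm k3, Ne.symm k4, Ne.symm k5, Ne.symm k6, Ne.symm k7, Ne.symm k8, Ne.symm k9]
  by_cases g1 : e1 = "contentment"
  · subst g1
    by_cases k0 : e2 = "joy"
    · subst k0; decide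
    by_cases k1 : e2 = "contentment"
    · subst k1; decide
    by_cases k2 : e2 = "engagement"
    · subst k2; decide
    by_cases k3 : e2 = "awe"
    · subst k3; decide
    by_cases k4 : e2 = "frustration"
    · subst k4; decide
    by_cases k5 : e2 = "concern"
    · subst k5; decide
    by_cases k6 : e2 = "confusion"
    · subst k6; decide
    by_cases k7 : e2 = "surprise"
    · subst k7; decide
    by_cases k8 : e2 = "contemplation"
    · subst k8; decide
    by_cases k9 : e2 = "neutral"
    · subst k9; decide
    simp [emotions_compatible_py, emotions_compatible_py.go, alt_eq, litIndex,
      PySem.Dict.getD, PySem.Dict.get?, PySem.Set.contains, PySem.Set.ofList, PySem.Set.add,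
      PySem.Set.inter, PySem.Set.empty,
      k0, k1, k2, k3, k4, k5, k6, k7, k8, k9, Ne.symm k0, Ne.symm k1, Ne.symm k2, Ne.symm k3, Ne.symm k4, Ne.symm k5, Ne.symm k6, Ne.symm k7, Ne.symm k8, Ne.symm k9]
  by_cases g2 : e1 = "engagement"
  · subst g2
    by_cases k0 : e2 = "joy"
    · subst k0; decide
    by_cases k1 : e2 = "contentment"
    · subst k1; decide
    by_cases k2 : e2 = "engagement"
    · subst k2; decide
    by_cases k3 : e2 = "awe"
    · subst k3; decide
    by_cases k4 : e2 = "frustration"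
    · subst k4; decide
    by_cases k5 : e2 = "concern"
    · subst k5; decide
    by_cases k6 : e2 = "confusion"
    · subst k6; decide
    by_cases k7 : e2 = "surprise"
    · subst k7; decide
    by_cases k8 : e2 = "contemplation"
    · subst k8; decide
    by_cases k9 : e2 = "neutral"
    · subst k9; decide
    simp [emotions_compatible_py, emotions_compatible_py.go, alt_eq, litIndex,
      PySem.Dict.getD, PySem.Dict.get?, PySem.Set.contains, PySem.Set.ofList, PySem.Set.add,
      PySem.Set.inter, PySem.Set.empty,
      k0, k1, k2, k3, k4, k5, k6, k7, k8, k9, Ne.symm k0, Ne.symm k1, Ne.symm k2, Ne.symm k3, Ne.symm k4, Ne.symm k5, Ne.symm k6, Ne.symm k7, Ne.symm k8, Ne.symm k9]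
  by_cases g3 : e1 = "awe"
  · subst g3
    by_cases k0 : e2 = "joy"
    · subst k0; decide
    by_cases k1 : e2 = "contentment"
    · subst k1; decide
    by_cases k2 : e2 = "engagement"
    · subst k2; decide
    by_cases k3 : e2 = "awe"
    · subst k3; decide
    by_cases k4 : e2 = "frustration"
    · subst k4; decide
    by_cases k5 : e2 = "concern"
    · subst k5; decide
    by_cases k6 : e2 = "confusion"
    · subst k6; decide
    by_cases k7 : e2 = "surprise"
    · subst k7; decide
    by_cases k8 : e2 = "contemplation"
    · subst k8; decide
    by_cases k9 : e2 = "neutral"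
    · subst k9; decide
    simp [emotions_compatible_py, emotions_compatible_py.go, alt_eq, litIndex,
      PySem.Dict.getD, PySem.Dict.get?, PySem.Set.contains, PySem.Set.ofList, PySem.Set.add,
      PySem.Set.inter, PySem.Set.empty,
      k0, k1, k2, k3, k4, k5, k6, k7, k8, k9, Ne.symm k0, Ne.symm k1, Ne.symm k2, Ne.symm k3, Ne.symm k4, Ne.symm k5, Ne.symm k6, Ne.symm k7, Ne.symm k8, Ne.symm k9]
  by_cases g4 : e1 = "frustration"
  · subst g4
    by_cases k0 : e2 = "joy"
    · subst k0; decide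
    by_cases k1 : e2 = "contentment"
    · subst k1; decide
    by_cases k2 : e2 = "engagement"
    · subst k2; decide
    by_cases k3 : e2 = "awe"
    · subst k3; decide
    by_cases k4 : e2 = "frustration"
    · subst k4; decide
    by_cases k5 : e2 = "concern"
    · subst k5; decide
    by_cases k6 : e2 = "confusion"
    · subst k6; decide
    by_cases k7 : e2 = "surprise"
    · subst k7; decide
    by_cases k8 : e2 = "contemplation"
    · subst k8; decide
    by_cases k9 : e2 = "neutral"
    · subst k9; decide
    simp [emotions_compatible_py, emotions_compatible_py.go, alt_eq, litIndex,
      PySem.Dict.getD, PySem.Dict.get?, PySem.Set.contains, PySem.Set.ofList, PySem.Set.add,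
      PySem.Set.inter, PySem.Set.empty,
      k0, k1, k2, k3, k4, k5, k6, k7, k8, k9, Ne.symm k0, Ne.symm k1, Ne.symm k2, Ne.symm k3, Ne.symm k4, Ne.symm k5, Ne.symm k6, Ne.symm k7, Ne.symm k8, Ne.symm k9]
  by_cases g5 : e1 = "concern"
  · subst g5
    by_cases k0 : e2 = "joy"
    · subst k0; decide
    by_cases k1 : e2 = "contentment"
    · subst k1; decide
    by_cases k2 : e2 = "engagement"
    · subst k2; decide
    by_cases k3 : e2 = "awe"
    · subst k3; decide
    by_cases k4 : e2 = "frustration"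
    · subst k4; decide
    by_cases k5 : e2 = "concern"
    · subst k5; decide
    by_cases k6 : e2 = "confusion"
    · subst k6; decide
    by_cases k7 : e2 = "surprise"
    · subst k7; decide
    by_cases k8 : e2 = "contemplation"
    · subst k8; decide
    by_cases k9 : e2 = "neutral"
    · subst k9; decide
    simp [emotions_compatible_py, emotions_compatible_py.go, alt_eq, litIndex,
      PySem.Dict.getD, PySem.Dict.get?, PySem.Set.contains, PySem.Set.ofList, PySem.Set.add,
      PySem.Set.inter, PySem.Set.empty,
      k0, k1, k2, k3, k4, k5, k6, k7, k8, k9, Ne.symm k0, Ne.symm k1, Ne.symm k2, Ne.symm k3, Ne.symm k4, Ne.symm k5, Ne.symm k6, Ne.symm k7, Ne.symm k8, Ne.symm k9]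
  by_cases g6 : e1 = "confusion"
  · subst g6
    by_cases k0 : e2 = "joy"
    · subst k0; decide
    by_cases k1 : e2 = "contentment"
    · subst k1; decide
    by_cases k2 : e2 = "engagement"
    · subst k2; decide
    by_cases k3 : e2 = "awe"
    · subst k3; decide
    by_cases k4 : e2 = "frustration"
    · subst k4; decide
    by_cases k5 : e2 = "concern"
    · subst k5; decide
    by_cases k6 : e2 = "confusion"
    · subst k6; decide
    by_cases k7 : e2 = "surprise"
    · subst k7; decide
    by_cases k8 : e2 = "contemplation"
    · subst k8; decide
    by_cases k9 : e2 = "neutral"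
    · subst k9; decide
    simp [emotions_compatible_py, emotions_compatible_py.go, alt_eq, litIndex,
      PySem.Dict.getD, PySem.Dict.get?, PySem.Set.contains, PySem.Set.ofList, PySem.Set.add,
      PySem.Set.inter, PySem.Set.empty,
      k0, k1, k2, k3, k4, k5, k6, k7, k8, k9, Ne.symm k0, Ne.symm k1, Ne.symm k2, Ne.symm k3, Ne.symm k4, Ne.symm k5, Ne.symm k6, Ne.symm k7, Ne.symm k8, Ne.symm k9]
  by_cases g7 : e1 = "surprise"
  · subst g7
    by_cases k0 : e2 = "joy"
    · subst k0; decide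
    by_cases k1 : e2 = "contentment"
    · subst k1; decide
    by_cases k2 : e2 = "engagement"
    · subst k2; decide
    by_cases k3 : e2 = "awe"
    · subst k3; decide
    by_cases k4 : e2 = "frustration"
    · subst k4; decide
    by_cases k5 : e2 = "concern"
    · subst k5; decide
    by_cases k6 : e2 = "confusion"
    · subst k6; decide
    by_cases k7 : e2 = "surprise"
    · subst k7; decide
    by_cases k8 : e2 = "contemplation"
    · subst k8; decide
    by_cases k9 : e2 = "neutral"
    · subst k9; decide
    simp [emotions_compatible_py, emotions_compatible_py.go, alt_eq, litIndex,
      PySem.Dict.getD, PySem.Dict.get?, PySem.Set.contains, PySem.Set.ofList, PySem.Set.add,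
      PySem.Set.inter, PySem.Set.empty,
      k0, k1, k2, k3, k4, k5, k6, k7, k8, k9, Ne.symm k0, Ne.symm k1, Ne.symm k2, Ne.symm k3, Ne.symm k4, Ne.symm k5, Ne.symm k6, Ne.symm k7, Ne.symm k8, Ne.symm k9]
  by_cases g8 : e1 = "contemplation"
  · subst g8
    by_cases k0 : e2 = "joy"
    · subst k0; decide
    by_cases k1 : e2 = "contentment"
    · subst k1; decide
    by_cases k2 : e2 = "engagement"
    · subst k2; decide
    by_cases k3 : e2 = "awe"
    · subst k3; decide
    by_cases k4 : e2 = "frustration"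
    · subst k4; decide
    by_cases k5 : e2 = "concern"
    · subst k5; decide
    by_cases k6 : e2 = "confusion"
    · subst k6; decide
    by_cases k7 : e2 = "surprise"
    · subst k7; decide
    by_cases k8 : e2 = "contemplation"
    · subst k8; decide
    by_cases k9 : e2 = "neutral"
    · subst k9; decide
    simp [emotions_compatible_py, emotions_compatible_py.go, alt_eq, litIndex,
      PySem.Dict.getD, PySem.Dict.get?, PySem.Set.contains, PySem.Set.ofList, PySem.Set.add,
      PySem.Set.inter, PySem.Set.empty,
      k0, k1, k2, k3, k4, k5, k6, k7, k8, k9, Ne.symm k0, Ne.symm k1, Ne.symm k2, Ne.symm k3, Ne.symm k4, Ne.symm k5, Ne.symm k6, Ne.symm k7, Ne.symm k8, Ne.symm k9]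
  by_cases g9 : e1 = "neutral"
  · subst g9
    by_cases k0 : e2 = "joy"
    · subst k0; decide
    by_cases k1 : e2 = "contentment"
    · subst k1; decide
    by_cases k2 : e2 = "engagement"
    · subst k2; decide
    by_cases k3 : e2 = "awe"
    · subst k3; decide
    by_cases k4 : e2 = "frustration"
    · subst k4; decide
    by_cases k5 : e2 = "concern"
    · subst k5; decide
    by_cases k6 : e2 = "confusion"
    · subst k6; decide
    by_cases k7 : e2 = "surprise"
    · subst k7; decide
    by_cases k8 : e2 = "contemplation"
    · subst k8; decide
    by_cases k9 : e2 = "neutral"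
    · subst k9; decide
    simp [emotions_compatible_py, emotions_compatible_py.go, alt_eq, litIndex,
      PySem.Dict.getD, PySem.Dict.get?, PySem.Set.contains, PySem.Set.ofList, PySem.Set.add,
      PySem.Set.inter, PySem.Set.empty,
      k0, k1, k2, k3, k4, k5, k6, k7, k8, k9, Ne.symm k0, Ne.symm k1, Ne.symm k2, Ne.symm k3, Ne.symm k4, Ne.symm k5, Ne.symm k6, Ne.symm k7, Ne.symm k8, Ne.symm k9]
  simp [emotions_compatible_py, emotions_compatible_py.go, alt_eq, litIndex,
    PySem.Dict.getD, PySem.Dict.get?, PySem.Set.contains, PySem.Set.ofList, PySem.Set.add,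
    PySem.Set.inter, PySem.Set.empty,
    g0, g1, g2, g3, g4, g5, g6, g7, g8, g9, Ne.symm g0, Ne.symm g1, Ne.symm g2, Ne.symm g3, Ne.symm g4, Ne.symm g5, Ne.symm g6, Ne.symm g7, Ne.symm g8, Ne.symm g9]
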